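-- pv_equiv track=rewrite | github.com/bugulin/Polynomials | polynomial/parse.py | parse
-- ===== SOURCE A (Python) =====
-- def parse(text):
--     result = []
--     t = ""
--     for i in text.replace(" ", ""):
--         if i in ["+", "-"]:
--             if t != "":
--                 result.append(t)
--                 result.append(i)
--                 t = ""
--             else:
--                 if not len(result) or result[-1] in ["*", "/", "(", "^"]:
--                     t += i
--                 else:
--                     result.append(i)
--         elif i in ["*", "/", "(", ")", "^"]:
--             if t != "":
--                 result.append(t)
--                 t = ""
--             if i == "(" and len(result) and result[-1] not in ["+", "-", "*", "/", "^", "("]: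
--                 result.append("*")
--             result.append(i)
--         elif i.isalpha():
--             if len(t):
--                 result.append(t)
--                 t = ""
--                 result.append("*")
--             elif len(result) and result[-1] not in ["+", "-", "*", "/", "^"]:
--                 result.append("*")
--             result.append(i)
--         else:
--             t += i
--     if t != "":
--         result.append(t)
--     return result
-- ===== SOURCE B (Python) =====
-- def parse(text):
--     s = text.replace(" ", "")
--     # pass 1: split into atoms: each special char (+-*/()^ or letter) alone,
--     # maximal runs of other chars as one atom
--     def special(c):
--         return c in "+-*/()^" or c.isalpha()
--     atoms = []
--     i, n = 0, len(s)
--     while i < n: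
--         if special(s[i]):
--             atoms.append(s[i])
--             i += 1
--         else:
--             j = i
--             while j < n and not special(s[j]):
--                 j += 1
--             atoms.append(s[i:j])
--             i = j
--     # pass 2: emit tokens, tracking a pending sign and the last emitted token
--     out = []
--     pending = None
--     for a in atoms:
--         if a in ("+", "-"):
--             if pending is not None:
--                 out.append(pending)
--                 out.append(a)
--                 pending = None
--             elif not out or out[-1] in ("*", "/", "(", "^"):
--                 pending = a
--             else:
--                 out.append(a)
--         elif a in ("*", "/", "(", ")", "^"):
--             if pending is not None:
--                 out.append(pending)
--                 pending = None
--             if a == "(" and out and out[-1] not in ("+", "-", "*", "/", "^", "("):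
--                 out.append("*")
--             out.append(a)
--         elif len(a) == 1 and a.isalpha():
--             if pending is not None:
--                 out.append(pending)
--                 pending = None
--                 out.append("*")
--             elif out and out[-1] not in ("+", "-", "*", "/", "^"):
--                 out.append("*")
--             out.append(a)
--         else:  # number run
--             if pending is not None:
--                 out.append(pending + a)
--                 pending = None
--             else:
--                 out.append(a)
--     if pending is not None:
--         out.append(pending)
--     return out
-- ===== Notes on version B (the rewrite author's own statement) =====
-- stated objective: alternative
-- what changed: Replaced A's single character-by-character pass with a mutable string buffer by a two-pass tokenizer: first split the text into atoms (single operator/sign/letter chars and maximal runs of other chars), then a normalization pass over atoms that tracks only a pending sign and glues it onto the next number run.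
import Mathlib
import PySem

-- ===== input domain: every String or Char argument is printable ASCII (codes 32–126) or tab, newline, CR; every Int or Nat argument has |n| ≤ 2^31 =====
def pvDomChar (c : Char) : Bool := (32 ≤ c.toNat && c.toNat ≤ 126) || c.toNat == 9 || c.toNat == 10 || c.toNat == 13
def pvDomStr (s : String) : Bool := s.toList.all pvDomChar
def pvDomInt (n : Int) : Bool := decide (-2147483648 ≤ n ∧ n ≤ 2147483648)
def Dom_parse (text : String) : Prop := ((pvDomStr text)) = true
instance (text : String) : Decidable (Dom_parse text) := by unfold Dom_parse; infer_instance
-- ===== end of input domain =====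

-- B re-implements the one-pass char/buffer tokenizer as two passes (atomize into
-- sign/op/letter/number-run atoms, then normalize with a pending-sign state); same
-- return value, objective: alternative decomposition.

-- ===== PORT A =====
-- A's single pass over the characters with a string buffer `t` (kept as List Char;
-- `result` is built head-first and reversed at the end; `isalpha` is exact on the ASCII domain).
def signA (c : Char) : Bool := c = '+' || c = '-'
def opA (c : Char) : Bool := c = '*' || c = '/' || c = '(' || c = ')' || c = '^'
def alphaA (c : Char) : Bool := ('a' ≤ c && c ≤ 'z') || ('A' ≤ c && c ≤ 'Z')

-- result[-1] ∈ L  (false on empty result)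
def lastInA (res : List (List Char)) (L : List (List Char)) : Bool :=
  match res with
  | [] => false
  | r :: _ => decide (r ∈ L)

def stepA (st : List (List Char) × List Char) (c : Char) : List (List Char) × List Char :=
  let res := st.1
  let t := st.2
  if signA c then
    if t ≠ [] then ([c] :: t :: res, [])
    else if res.isEmpty || lastInA res [['*'], ['/'], ['('], ['^']] then (res, t ++ [c])
    else ([c] :: res, [])
  else if opA c then
    let res1 := if t ≠ [] then t :: res else res
    let res2 := if c = '(' && !res1.isEmpty && !lastInA res1 [['+'], ['-'], ['*'], ['/'], ['^'], ['(']]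
                then ['*'] :: res1 else res1
    ([c] :: res2, [])
  else if alphaA c then
    if t ≠ [] then ([c] :: ['*'] :: t :: res, [])
    else if !res.isEmpty && !lastInA res [['+'], ['-'], ['*'], ['/'], ['^']] then
      ([c] :: ['*'] :: res, [])
    else ([c] :: res, [])
  else (res, t ++ [c])

def parse (text : String) : List String :=
  let cs := (PySem.Str.replace text " " "").toList
  let st := cs.foldl stepA ([], [])
  ((if st.2 = [] then st.1 else st.2 :: st.1).reverse).map (fun l => String.mk l)

-- ===== PORT B =====
def signB (c : Char) : Bool := c = '+' || c = '-'
def opB (c : Char) : Bool := c = '*' || c = '/' || c = '(' || c = ')' || c = '^'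
def alphaB (c : Char) : Bool := ('a' ≤ c && c ≤ 'z') || ('A' ≤ c && c ≤ 'Z')
def specialB (c : Char) : Bool := signB c || opB c || alphaB c

inductive PAtom where
  | sym : Char → PAtom
  | num : List Char → PAtom
deriving DecidableEq, Repr

-- pass 1: each special char its own atom, maximal runs of other chars one atom
def atomize : List Char → List PAtom
  | [] => []
  | c :: cs =>
    if specialB c then .sym c :: atomize cs
    else .num (c :: cs.takeWhile (fun d => !specialB d)) ::
           atomize (cs.dropWhile (fun d => !specialB d))
termination_by cs => cs.length
decreasing_by
  · simp
  · have := List.length_dropWhile_le (fun d => !specialB d) cs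
    simp only [List.length_cons]; omega

def lastInB (out : List (List Char)) (L : List (List Char)) : Bool :=
  match out with
  | [] => false
  | r :: _ => decide (r ∈ L)

-- pass 2: normalize atoms tracking a pending sign (out is built head-first)
def stepB (st : List (List Char) × Option Char) (a : PAtom) : List (List Char) × Option Char :=
  match a with
  | .sym c =>
    if signB c then
      match st.2 with
      | some p => ([c] :: [p] :: st.1, none)
      | none =>
        if st.1.isEmpty || lastInB st.1 [['*'], ['/'], ['('], ['^']] then (st.1, some c)
        else ([c] :: st.1, none)
    else if opB c then
      let out := match st.2 with | some p => [p] :: st.1 | none => st.1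
      let out2 := if c = '(' && !out.isEmpty && !lastInB out [['+'], ['-'], ['*'], ['/'], ['^'], ['(']]
                  then ['*'] :: out else out
      ([c] :: out2, none)
    else
      match st.2 with
      | some p => ([c] :: ['*'] :: [p] :: st.1, none)
      | none =>
        if !st.1.isEmpty && !lastInB st.1 [['+'], ['-'], ['*'], ['/'], ['^']] then
          ([c] :: ['*'] :: st.1, none)
        else ([c] :: st.1, none)
  | .num run =>
    match st.2 with
    | some p => ((p :: run) :: st.1, none)
    | none => (run :: st.1, none)

def parse_alt (text : String) : List String :=
  let cs := (PySem.Str.replace text " " "").toList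
  let st := (atomize cs).foldl stepB ([], none)
  ((match st.2 with | some p => [p] :: st.1 | none => st.1).reverse).map (fun l => String.mk l)

-- ===== PRECONDITION & SPEC =====
def Spec_parse (text : String) (out : List String) : Prop := out = parse_alt text
instance (text : String) (out : List String) : Decidable (Spec_parse text out) := by unfold Spec_parse; infer_instance

-- ===== CLAIM (what is proved, stated in full; the proofs are below) =====
def Claim_equal_parse : Prop := ∀ (text : String), Dom_parse text → Spec_parse text (parse text)

-- ===== LEMMAS AND PROOFS =====

-- A's finisher (flush t) and B's finisher (flush pending)
def finalA (st : List (List Char) × List Char) : List (List Char) :=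
  if st.2 = [] then st.1 else st.2 :: st.1

def finalB (st : List (List Char) × Option Char) : List (List Char) :=
  match st.2 with | some p => [p] :: st.1 | none => st.1

-- B's state corresponding to A's state (res, t)
def bstate (res : List (List Char)) (t : List Char) : List (List Char) × Option Char :=
  match t with
  | [] => (res, none)
  | [c] => if signB c then (res, some c) else (t :: res, none)
  | _ => (t :: res, none)

-- invariant for A's buffer t relative to the remaining input cs
def GoodT (t : List Char) (cs : List Char) : Prop :=
  t = [] ∨ (∃ s, t = [s] ∧ signB s = true) ∨
  (t ≠ [] ∧ t ∉ [['+'], ['-'], ['*'], ['/'], ['('], ['^']] ∧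
    (cs = [] ∨ ∃ d cs', cs = d :: cs' ∧ specialB d = true))

lemma runFoldA (run : List Char) (h : ∀ c ∈ run, specialB c = false) :
    ∀ res t, List.foldl stepA (res, t) run = (res, t ++ run) := by
  induction run with
  | nil => intro res t; simp
  | cons c cs ih =>
    intro res t
    have hc := h c (by simp)
    have hs : signA c = false := by
      simp [specialB, signB, opB, alphaB, signA, opA, alphaA] at hc ⊢; tauto
    have ho : opA c = false := by
      simp [specialB, signB, opB, alphaB, signA, opA, alphaA] at hc ⊢; tauto
    have ha : alphaA c = false := by
      simp [specialB, signB, opB, alphaB, signA, opA, alphaA] at hc ⊢; tauto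
    simp only [List.foldl_cons]
    rw [show stepA (res, t) c = (res, t ++ [c]) by simp [stepA, hs, ho, ha]]
    rw [ih (fun x hx => h x (by simp [hx])) res (t ++ [c])]
    simp

lemma lastInB_eq : lastInB = lastInA := rfl

lemma signA_eq : signA = signB := rfl
lemma opA_eq : opA = opB := rfl
lemma alphaA_eq : alphaA = alphaB := rfl

lemma op_not_sign (c : Char) (h : opB c = true) : signB c = false := by
  simp only [opB, Bool.or_eq_true, decide_eq_true_eq] at h
  rcases h with (((rfl | rfl) | rfl) | rfl) | rfl <;> rfl

lemma alpha_not_sign (c : Char) (h : alphaB c = true) : signB c = false := by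
  simp only [signB, Bool.or_eq_true, decide_eq_true_eq, Bool.or_eq_false_iff,
    decide_eq_false_iff_not]
  constructor <;> rintro rfl <;> revert h <;> decide

lemma alpha_not_op (c : Char) (h : alphaB c = true) : opB c = false := by
  simp only [opB, Bool.or_eq_true, decide_eq_true_eq, Bool.or_eq_false_iff,
    decide_eq_false_iff_not]
  refine ⟨⟨⟨⟨?_, ?_⟩, ?_⟩, ?_⟩, ?_⟩ <;> rintro rfl <;> revert h <;> decide

lemma notsign_of_notbad (t : List Char) (hne : t ≠ [])
    (hnb : t ∉ [['+'], ['-'], ['*'], ['/'], ['('], ['^']]) :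
    ∀ c, t = [c] → signB c = false := by
  rintro c rfl
  cases hc : signB c
  · rfl
  · exfalso
    simp only [signB, Bool.or_eq_true, decide_eq_true_eq] at hc
    rcases hc with rfl | rfl <;> simp at hnb

lemma bstate_C (res : List (List Char)) (t : List Char) (hne : t ≠ [])
    (hnb : t ∉ [['+'], ['-'], ['*'], ['/'], ['('], ['^']]) :
    bstate res t = (t :: res, none) := by
  match t, hne with
  | [c], _ =>
    have := notsign_of_notbad [c] (by simp) hnb c rfl
    simp [bstate, this]
  | c₁ :: c₂ :: ts, _ => simp [bstate]

lemma notbad_of_head_nonspecial (c : Char) (ts : List Char) (h : specialB c = false) :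
    (c :: ts) ∉ [['+'], ['-'], ['*'], ['/'], ['('], ['^']] := by
  intro hm
  simp only [List.mem_cons, List.mem_singleton, List.cons.injEq, List.not_mem_nil,
    or_false] at hm
  rcases hm with ⟨rfl, _⟩ | ⟨rfl, _⟩ | ⟨rfl, _⟩ | ⟨rfl, _⟩ | ⟨rfl, _⟩ | ⟨rfl, _⟩ <;>
    revert h <;> decide

lemma notbad_len2 (a b : Char) (ts : List Char) :
    (a :: b :: ts) ∉ [['+'], ['-'], ['*'], ['/'], ['('], ['^']] := by
  intro hm
  simp only [List.mem_cons, List.not_mem_nil, or_false] at hm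
  rcases hm with h | h | h | h | h | h <;> exact absurd (congrArg List.length h) (by simp)

lemma dropWhile_head_special :
    ∀ (l : List Char) (d : Char) (cs' : List Char),
      l.dropWhile (fun x => !specialB x) = d :: cs' → specialB d = true := by
  intro l
  induction l with
  | nil => intro d cs' h; simp [List.dropWhile] at h
  | cons a l ih =>
    intro d cs' h
    cases ha : specialB a with
    | true =>
      rw [List.dropWhile_cons_of_neg (by simp [ha])] at h
      injection h with h1 _
      rw [← h1]; exact ha
    | false =>
      rw [List.dropWhile_cons_of_pos (by simp [ha])] at h
      exact ih d cs' h

lemma step_special (c : Char) (res : List (List Char)) (t : List Char) (cs' : List Char)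
    (hc : specialB c = true) (hg : GoodT t (c :: cs')) :
    stepB (bstate res t) (.sym c) =
      bstate (stepA (res, t) c).1 (stepA (res, t) c).2 ∧
    GoodT (stepA (res, t) c).2 cs' := by
  simp only [specialB, Bool.or_eq_true] at hc
  rcases hc with (hsg | hop) | hal
  · -- sign char
    rcases hg with rfl | ⟨s, rfl, hs⟩ | ⟨hne, hnb, _⟩
    · by_cases hcond : (res.isEmpty || lastInA res [['*'], ['/'], ['('], ['^']]) = true
      · constructor
        · simp [stepA, stepB, bstate, signA_eq, hsg, lastInB_eq, hcond]
        · have h2 : (stepA (res, ([] : List Char)) c).2 = [c] := by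
            simp [stepA, signA_eq, hsg, hcond]
          rw [h2]; exact Or.inr (Or.inl ⟨c, rfl, hsg⟩)
      · constructor
        · simp [stepA, stepB, bstate, signA_eq, hsg, lastInB_eq, hcond]
        · have h2 : (stepA (res, ([] : List Char)) c).2 = [] := by
            simp [stepA, signA_eq, hsg, hcond]
          rw [h2]; exact Or.inl rfl
    · constructor
      · simp [stepA, stepB, bstate, signA_eq, hsg, hs]
      · have h2 : (stepA (res, [s]) c).2 = [] := by simp [stepA, signA_eq, hsg]
        rw [h2]; exact Or.inl rfl
    · have hb := bstate_C res t hne hnb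
      have h1 : lastInA (t :: res) [['*'], ['/'], ['('], ['^']] = false := by
        simp only [lastInA, decide_eq_false_iff_not]
        intro hm; apply hnb
        simp only [List.mem_cons, List.not_mem_nil, or_false] at hm ⊢
        tauto
      constructor
      · rw [hb]; simp [stepA, stepB, bstate, signA_eq, hsg, lastInB_eq, h1, hne]
      · have h2 : (stepA (res, t) c).2 = [] := by simp [stepA, signA_eq, hsg, hne]
        rw [h2]; exact Or.inl rfl
  · -- operator char
    have hsg : signB c = false := op_not_sign c hop
    rcases hg with rfl | ⟨s, rfl, hs⟩ | ⟨hne, hnb, _⟩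
    · constructor
      · simp [stepA, stepB, bstate, signA_eq, opA_eq, hsg, hop, lastInB_eq]
      · have h2 : (stepA (res, ([] : List Char)) c).2 = [] := by
          simp [stepA, signA_eq, opA_eq, hsg, hop]
        rw [h2]; exact Or.inl rfl
    · constructor
      · simp [stepA, stepB, bstate, signA_eq, opA_eq, hsg, hop, hs, lastInB_eq]
      · have h2 : (stepA (res, [s]) c).2 = [] := by
          simp [stepA, signA_eq, opA_eq, hsg, hop]
        rw [h2]; exact Or.inl rfl
    · have hb := bstate_C res t hne hnb
      constructor
      · rw [hb]; simp [stepA, stepB, bstate, signA_eq, opA_eq, hsg, hop, lastInB_eq, hne]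
      · have h2 : (stepA (res, t) c).2 = [] := by
          simp [stepA, signA_eq, opA_eq, hsg, hop, hne]
        rw [h2]; exact Or.inl rfl
  · -- letter
    have hsg : signB c = false := alpha_not_sign c hal
    have hop : opB c = false := alpha_not_op c hal
    rcases hg with rfl | ⟨s, rfl, hs⟩ | ⟨hne, hnb, _⟩
    · constructor
      · simp only [stepA, stepB, bstate, signA_eq, opA_eq, alphaA_eq, hsg, hop, hal,
          lastInB_eq, Bool.false_eq_true, if_false]
        split <;> simp [bstate]
      · have h2 : (stepA (res, ([] : List Char)) c).2 = [] := by
          simp only [stepA, signA_eq, opA_eq, alphaA_eq, hsg, hop, hal]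
          simp only [ne_eq, not_true_eq_false, Bool.false_eq_true, if_false, if_true,
            not_false_eq_true, reduceIte]
          split <;> rfl
        rw [h2]; exact Or.inl rfl
    · constructor
      · simp [stepA, stepB, bstate, signA_eq, opA_eq, alphaA_eq, hsg, hop, hal, hs]
      · have h2 : (stepA (res, [s]) c).2 = [] := by
          simp [stepA, signA_eq, opA_eq, alphaA_eq, hsg, hop, hal]
        rw [h2]; exact Or.inl rfl
    · have hb := bstate_C res t hne hnb
      have h1 : lastInA (t :: res) [['+'], ['-'], ['*'], ['/'], ['^']] = false := by
        simp only [lastInA, decide_eq_false_iff_not]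
        intro hm; apply hnb
        simp only [List.mem_cons, List.not_mem_nil, or_false] at hm ⊢
        tauto
      constructor
      · rw [hb]
        simp [stepA, stepB, bstate, signA_eq, opA_eq, alphaA_eq, hsg, hop, hal,
          lastInB_eq, h1, hne]
      · have h2 : (stepA (res, t) c).2 = [] := by
          simp [stepA, signA_eq, opA_eq, alphaA_eq, hsg, hop, hal, hne]
        rw [h2]; exact Or.inl rfl

lemma base_case (res : List (List Char)) (t : List Char) (hg : GoodT t []) :
    finalA (res, t) = finalB (bstate res t) := by
  rcases hg with rfl | ⟨s, rfl, hs⟩ | ⟨hne, hnb, _⟩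
  · simp [finalA, finalB, bstate]
  · simp [finalA, finalB, bstate, hs]
  · rw [bstate_C res t hne hnb]
    simp [finalA, finalB, hne]

lemma main_lemma : ∀ n cs res t, cs.length ≤ n → GoodT t cs →
    finalA (List.foldl stepA (res, t) cs) =
    finalB (List.foldl stepB (bstate res t) (atomize cs)) := by
  intro n
  induction n with
  | zero =>
    intro cs res t hlen hg
    have hcs : cs = [] := List.length_eq_zero_iff.mp (Nat.le_zero.mp hlen)
    subst hcs
    simpa [atomize] using base_case res t hg
  | succ m ih =>
    intro cs res t hlen hg
    cases cs with
    | nil => simpa [atomize] using base_case res t hg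
    | cons c cs' =>
      by_cases hc : specialB c = true
      · obtain ⟨hB, hg₂⟩ := step_special c res t cs' hc hg
        rw [show atomize (c :: cs') = .sym c :: atomize cs' by simp [atomize, hc]]
        simp only [List.foldl_cons, hB]
        exact ih cs' (stepA (res, t) c).1 (stepA (res, t) c).2
          (by simpa using Nat.le_of_succ_le_succ (by simpa using hlen)) hg₂
      · -- number-run char: A glues the whole run onto t, B consumes one num atom
        have hc' : specialB c = false := by revert hc; cases specialB c <;> simp
        have hruns : ∀ x ∈ c :: cs'.takeWhile (fun d => !specialB d), specialB x = false := by
          intro x hx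
          rcases List.mem_cons.mp hx with rfl | hx
          · exact hc'
          · simpa using List.mem_takeWhile_imp hx
        have hatom : atomize (c :: cs') =
            .num (c :: cs'.takeWhile (fun d => !specialB d)) ::
              atomize (cs'.dropWhile (fun d => !specialB d)) := by
          rw [atomize]; simp [hc']
        have hsplit : c :: cs' = (c :: cs'.takeWhile (fun d => !specialB d)) ++
            cs'.dropWhile (fun d => !specialB d) := by
          rw [List.cons_append, List.takeWhile_append_dropWhile]
        have hrestlen : (cs'.dropWhile (fun d => !specialB d)).length ≤ m := by
          have h1 := List.length_dropWhile_le (fun d => !specialB d) cs'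
          have h2 : cs'.length ≤ m := by simpa using Nat.le_of_succ_le_succ (by simpa using hlen)
          omega
        have hheadrest : cs'.dropWhile (fun d => !specialB d) = [] ∨
            ∃ d ds, cs'.dropWhile (fun d => !specialB d) = d :: ds ∧ specialB d = true := by
          cases hr : cs'.dropWhile (fun d => !specialB d) with
          | nil => exact Or.inl rfl
          | cons d ds => exact Or.inr ⟨d, ds, rfl, dropWhile_head_special cs' d ds hr⟩
        rw [hatom]
        conv_lhs => rw [hsplit]
        rw [List.foldl_append, runFoldA _ hruns res t]
        simp only [List.foldl_cons]
        -- class C is impossible here (the head of cs is not special)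
        rcases hg with rfl | ⟨s, rfl, hs⟩ | ⟨_, _, habs⟩
        · -- t = []
          have hB : stepB (bstate res []) (.num (c :: cs'.takeWhile (fun d => !specialB d))) =
              bstate res (c :: cs'.takeWhile (fun d => !specialB d)) := by
            rw [bstate_C res _ (by simp) (notbad_of_head_nonspecial c _ hc')]
            simp [bstate, stepB]
          rw [hB]
          refine ih _ res _ hrestlen ?_
          exact Or.inr (Or.inr ⟨by simp, notbad_of_head_nonspecial c _ hc', hheadrest⟩)
        · -- t = [s], a pending sign gets glued onto the run
          have hB : stepB (bstate res [s]) (.num (c :: cs'.takeWhile (fun d => !specialB d))) =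
              bstate res ([s] ++ c :: cs'.takeWhile (fun d => !specialB d)) := by
            rw [show ([s] ++ c :: cs'.takeWhile (fun d => !specialB d)) =
                s :: c :: cs'.takeWhile (fun d => !specialB d) from rfl,
              bstate_C res _ (by simp) (notbad_len2 _ _ _)]
            simp [bstate, stepB, hs]
          rw [hB]
          refine ih _ res _ hrestlen ?_
          exact Or.inr (Or.inr ⟨by simp, notbad_len2 _ _ _, hheadrest⟩)
        · rcases habs with h | ⟨d, ds, h1, h2⟩
          · simp at h
          · injection h1 with h1 _
            rw [← h1] at h2
            exact absurd h2 (by simp [hc'])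

theorem parse_eq (text : String) : parse text = parse_alt text := by
  have h := main_lemma ((PySem.Str.replace text " " "").toList.length)
      ((PySem.Str.replace text " " "").toList) [] [] (le_refl _) (Or.inl rfl)
  simp only [parse, parse_alt]
  simp only [finalA, finalB, bstate] at h
  rw [show (if ((PySem.Str.replace text " " "").toList.foldl stepA ([], [])).2 = [] then
        ((PySem.Str.replace text " " "").toList.foldl stepA ([], [])).1
      else ((PySem.Str.replace text " " "").toList.foldl stepA ([], [])).2 ::
        ((PySem.Str.replace text " " "").toList.foldl stepA ([], [])).1) =
      (match ((atomize (PySem.Str.replace text " " "").toList).foldl stepB ([], none)).2 with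
       | some p => [p] :: ((atomize (PySem.Str.replace text " " "").toList).foldl stepB ([], none)).1
       | none => ((atomize (PySem.Str.replace text " " "").toList).foldl stepB ([], none)).1) from h]

-- ===== VERDICT (by name: the statement is the Claim_ definition above) =====
theorem parse_spec : Claim_equal_parse := by
  intro text _
  unfold Spec_parse
  exact parse_eq text
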